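-- pv_equiv track=rewrite | github.com/whuhit/LeetCode | 1160.拼写单词.py | know
-- ===== SOURCE A (Python) =====
-- def know(word, chars):
--     lc = list(chars)
--     for c in word:
--         if c not in lc:
--             return False
--         else:
--             lc.remove(c)
--     return True
-- ===== SOURCE B (Python) =====
-- def know(word, chars):
--     sw = sorted(word)
--     sc = sorted(chars)
--     i = j = 0
--     while i < len(sw):
--         if j == len(sc):
--             return False
--         if sc[j] < sw[i]:
--             j += 1
--         elif sc[j] == sw[i]:
--             i += 1
--             j += 1
--         else:
--             return False
--     return True
-- ===== Notes on version B (the rewrite author's own statement) =====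
-- stated objective: faster
-- what changed: Sorts word and chars and matches them with a single two-pointer merge instead of a per-character membership scan plus list.remove.
import Mathlib
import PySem

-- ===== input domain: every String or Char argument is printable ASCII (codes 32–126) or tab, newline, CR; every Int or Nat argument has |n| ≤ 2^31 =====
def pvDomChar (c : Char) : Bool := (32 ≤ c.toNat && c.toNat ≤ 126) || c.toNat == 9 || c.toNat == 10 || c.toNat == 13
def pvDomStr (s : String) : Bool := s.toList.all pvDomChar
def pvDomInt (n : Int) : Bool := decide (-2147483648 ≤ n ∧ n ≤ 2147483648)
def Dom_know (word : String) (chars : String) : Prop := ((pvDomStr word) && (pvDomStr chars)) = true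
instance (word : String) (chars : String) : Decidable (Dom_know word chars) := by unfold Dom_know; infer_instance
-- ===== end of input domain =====

-- B sorts both strings and matches them with one two-pointer merge pass instead of A's
-- per-character membership scan + list.remove.

-- ===== PORT A =====
-- 'lc.remove(c)' runs only after 'c not in lc' failed, so it removes the first
-- occurrence of a present element: exactly List.erase.
def knowLoopA : List Char → List Char → Bool
  | [], _ => true
  | c :: rest, lc =>
    if !lc.contains c then false
    else knowLoopA rest (lc.erase c)

def know (word : String) (chars : String) : Bool :=
  knowLoopA word.toList chars.toList

-- ===== PORT B =====
-- Source B's while loop over indices (i, j); the pointer pair is represented by the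
-- suffixes sw[i:], sc[j:], advanced exactly as the three branches of the loop do.
def knowMerge : List Char → List Char → Bool
  | [], _ => true
  | _ :: _, [] => false
  | a :: as_, b :: bs =>
    if b < a then knowMerge (a :: as_) bs
    else if b == a then knowMerge as_ bs
    else false
termination_by sw sc => sw.length + sc.length

def know_alt (word : String) (chars : String) : Bool :=
  knowMerge (PySem.List.sorted word.toList (fun x => x) false)
            (PySem.List.sorted chars.toList (fun x => x) false)

-- ===== PRECONDITION & SPEC =====
def Spec_know (word : String) (chars : String) (out : Bool) : Prop := out = know_alt word chars
instance (word : String) (chars : String) (out : Bool) : Decidable (Spec_know word chars out) := by unfold Spec_know; infer_instance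

-- ===== CLAIM (what is proved, stated in full; the proofs are below) =====
def Claim_equal_know : Prop := ∀ (word : String) (chars : String), Dom_know word chars → Spec_know word chars (know word chars)

-- ===== LEMMAS AND PROOFS =====

-- A's loop decides the sub-multiset relation.
theorem knowLoopA_iff (w : List Char) : ∀ (lc : List Char),
    knowLoopA w lc = true ↔ ∀ x, w.count x ≤ lc.count x := by
  induction w with
  | nil => intro lc; simp [knowLoopA]
  | cons c rest ih =>
    intro lc
    by_cases hc : c ∈ lc
    · have hcon : lc.contains c = true := by simpa using hc
      have h1 : 1 ≤ lc.count c := List.one_le_count_iff.mpr hc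
      simp only [knowLoopA, hcon, Bool.not_true, Bool.false_eq_true, if_false, ih]
      constructor
      · intro h x
        have hx2 := h x
        have herase := List.count_erase (l := lc) (a := x) (b := c)
        by_cases hx : c = x
        · subst hx
          simp only [beq_self_eq_true, if_true] at herase
          rw [herase] at hx2
          simp only [List.count_cons_self]
          omega
        · have hb : (c == x) = false := beq_false_of_ne hx
          simp only [hb, Bool.false_eq_true, if_false, Nat.sub_zero] at herase
          rw [herase] at hx2
          rw [List.count_cons_of_ne hx]
          exact hx2
      · intro h x
        have hx2 := h x
        have herase := List.count_erase (l := lc) (a := x) (b := c)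
        by_cases hx : c = x
        · subst hx
          simp only [beq_self_eq_true, if_true] at herase
          rw [herase]
          simp only [List.count_cons_self] at hx2
          omega
        · have hb : (c == x) = false := beq_false_of_ne hx
          simp only [hb, Bool.false_eq_true, if_false, Nat.sub_zero] at herase
          rw [herase]
          rw [List.count_cons_of_ne hx] at hx2
          exact hx2
    · have hcon : lc.contains c = false := by simpa using hc
      have h0 : lc.count c = 0 := List.count_eq_zero.mpr hc
      simp only [knowLoopA, hcon, Bool.not_false, if_true, Bool.false_eq_true, false_iff]
      intro h
      have hx2 := h c
      simp [List.count_cons_self, h0] at hx2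

-- count of an element smaller than the head of a ≤-sorted list is zero
theorem count_zero_of_lt_head (a x : Char) (l : List Char)
    (hw : (a :: l).Pairwise (· ≤ ·)) (hxa : x < a) : (a :: l).count x = 0 := by
  apply List.count_eq_zero.mpr
  intro hmem
  rcases List.mem_cons.mp hmem with rfl | hmem
  · exact absurd hxa (lt_irrefl _)
  · have hle : a ≤ x := (List.pairwise_cons.mp hw).1 _ hmem
    exact absurd (lt_of_lt_of_le hxa hle) (lt_irrefl _)

-- B's merge decides the same relation on sorted inputs.
theorem knowMerge_iff : ∀ (sw sc : List Char),
    sw.Pairwise (· ≤ ·) → sc.Pairwise (· ≤ ·) →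
    (knowMerge sw sc = true ↔ ∀ x, sw.count x ≤ sc.count x) := by
  intro sw sc
  induction sw, sc using knowMerge.induct with
  | case1 sc =>
    intro _ _; simp [knowMerge]
  | case2 a as_ =>
    intro _ _
    simp only [knowMerge, Bool.false_eq_true, false_iff]
    intro h
    have hx2 := h a
    simp [List.count_cons_self] at hx2
  | case3 a as_ b bs hba ih =>
    intro hw hcs
    have hcs' := List.Pairwise.of_cons hcs
    simp only [knowMerge, if_pos hba]
    rw [ih hw hcs']
    constructor
    · intro h x
      by_cases hx : x = b
      · subst hx
        simp [count_zero_of_lt_head a x as_ hw hba]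
      · rw [List.count_cons_of_ne (Ne.symm hx)]
        exact h x
    · intro h x
      by_cases hx : x = b
      · subst hx
        simp [count_zero_of_lt_head a x as_ hw hba]
      · have hx2 := h x
        rwa [List.count_cons_of_ne (Ne.symm hx)] at hx2
  | case4 a as_ b bs hba hbeq ih =>
    intro hw hcs
    have hb : b = a := by simpa using hbeq
    subst hb
    simp only [knowMerge, if_neg hba, if_pos hbeq]
    rw [ih (List.Pairwise.of_cons hw) (List.Pairwise.of_cons hcs)]
    constructor
    · intro h x
      by_cases hx : x = b
      · subst hx
        simp only [List.count_cons_self]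
        have := h x; omega
      · rw [List.count_cons_of_ne (Ne.symm hx), List.count_cons_of_ne (Ne.symm hx)]
        exact h x
    · intro h x
      have hx2 := h x
      by_cases hx : x = b
      · subst hx
        simp only [List.count_cons_self] at hx2
        omega
      · rwa [List.count_cons_of_ne (Ne.symm hx), List.count_cons_of_ne (Ne.symm hx)] at hx2
  | case5 a as_ b bs hba hbeq =>
    intro hw hcs
    have hab : a < b := by
      rcases lt_trichotomy a b with h | h | h
      · exact h
      · exact absurd (by simp [h] : (b == a) = true) (by simpa using hbeq)
      · exact absurd h hba
    simp only [knowMerge, if_neg hba, if_neg hbeq, Bool.false_eq_true, false_iff]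
    intro h
    have hx2 := h a
    have hcnt : (b :: bs).count a = 0 := count_zero_of_lt_head b a bs hcs hab
    simp [List.count_cons_self, hcnt] at hx2

-- ===== VERDICT (by name: the statement is the Claim_ definition above) =====
theorem know_spec : Claim_equal_know := by
  intro word chars _
  unfold Spec_know know know_alt
  have hpw := PySem.List.sorted_perm (xs := word.toList) (key := fun x : Char => x) (rev := false)
  have hpc := PySem.List.sorted_perm (xs := chars.toList) (key := fun x : Char => x) (rev := false)
  have hsw := PySem.List.sorted_pairwise (xs := word.toList) (key := fun x : Char => x)
  have hsc := PySem.List.sorted_pairwise (xs := chars.toList) (key := fun x : Char => x)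
  have hA := knowLoopA_iff word.toList chars.toList
  have hB := knowMerge_iff _ _ hsw hsc
  rcases hb : knowMerge (PySem.List.sorted word.toList (fun x => x) false)
      (PySem.List.sorted chars.toList (fun x => x) false) with _ | _
  · -- merge = false: show A = false
    rw [← Bool.not_eq_true]
    intro hAtrue
    have hsub := hA.mp hAtrue
    have : ∀ x, (PySem.List.sorted word.toList (fun x => x) false).count x ≤
        (PySem.List.sorted chars.toList (fun x => x) false).count x := by
      intro x
      rw [hpw.count_eq, hpc.count_eq]
      exact hsub x
    have := hB.mpr this
    rw [hb] at this
    exact absurd this (by simp)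
  · -- merge = true
    have hsub := hB.mp hb
    apply hA.mpr
    intro x
    have := hsub x
    rwa [hpw.count_eq, hpc.count_eq] at this
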